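-- pv_equiv track=rewrite | github.com/Vasilijez/operations-research-algorithms | GA_restaurant_reservation/implementation.py | reservations_number_function
-- ===== SOURCE A (Python) =====
-- def reservations_number_function(chromosome):
--   reservations_number = 0
--   current_reservation = 0
--
--   for table in chromosome:
--     for time_slot in table:
--       if time_slot > 0 and current_reservation != time_slot:
--         current_reservation = time_slot
--         reservations_number += 1
--
--   return reservations_number
-- ===== SOURCE B (Python) =====
-- def reservations_number_function(chromosome):
--   slots = [s for t in chromosome for s in t if s > 0]
--   count = 0
--   i = 0
--   n = len(slots)
--   while i < n:
--     count += 1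
--     v = slots[i]
--     while i < n and slots[i] == v:
--       i += 1
--   return count
-- ===== Notes on version B (the rewrite author's own statement) =====
-- stated objective: alternative
-- what changed: Instead of A's state machine carrying the last seen reservation and counting transitions, B flattens and filters the positive slots in a first pass and then counts maximal runs of equal values by skipping over each whole run with an index loop (run-length grouping).
import Mathlib
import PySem

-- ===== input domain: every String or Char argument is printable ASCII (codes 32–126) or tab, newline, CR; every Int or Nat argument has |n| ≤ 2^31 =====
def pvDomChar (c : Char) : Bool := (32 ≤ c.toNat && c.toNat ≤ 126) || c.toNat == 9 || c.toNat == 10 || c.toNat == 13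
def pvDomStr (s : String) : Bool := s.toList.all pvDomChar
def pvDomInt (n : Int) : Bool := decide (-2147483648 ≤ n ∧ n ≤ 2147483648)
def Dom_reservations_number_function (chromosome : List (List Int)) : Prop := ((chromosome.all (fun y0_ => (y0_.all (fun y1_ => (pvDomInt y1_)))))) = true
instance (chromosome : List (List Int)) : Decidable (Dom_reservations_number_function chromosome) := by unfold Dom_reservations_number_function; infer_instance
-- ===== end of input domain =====

-- B replaces A's transition-counting state machine by a staged pass: filter the positive
-- slots, then count maximal runs of equal values by skipping each whole run (same cost).

-- ===== PORT A =====
def reservations_number_function (chromosome : List (List Int)) : Int :=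
  (chromosome.foldl (fun st table =>
      table.foldl (fun st time_slot =>
        if time_slot > 0 ∧ st.2 ≠ time_slot then (st.1 + 1, time_slot) else st) st)
    ((0 : Int), (0 : Int))).1

-- ===== PORT B =====
-- B's outer while loop (one iteration per run) becomes recursion on the list; its inner
-- while loop, which advances the index past the current run, becomes dropWhile.
def pvRuns : List Int → Int
  | [] => 0
  | v :: rest => 1 + pvRuns (rest.dropWhile (fun x => x == v))
termination_by xs => xs.length
decreasing_by
  exact Nat.lt_succ_of_le (List.length_dropWhile_le _ _)

def reservations_number_function_alt (chromosome : List (List Int)) : Int :=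
  pvRuns (chromosome.flatMap (fun t => t.filter (fun s => s > 0)))

-- ===== PRECONDITION & SPEC =====
def Spec_reservations_number_function (chromosome : List (List Int)) (out : Int) : Prop := out = reservations_number_function_alt chromosome
instance (chromosome : List (List Int)) (out : Int) : Decidable (Spec_reservations_number_function chromosome out) := by unfold Spec_reservations_number_function; infer_instance

-- ===== CLAIM (what is proved, stated in full; the proofs are below) =====
def Claim_equal_reservations_number_function : Prop := ∀ (chromosome : List (List Int)), Dom_reservations_number_function chromosome → Spec_reservations_number_function chromosome (reservations_number_function chromosome)

-- ===== LEMMAS AND PROOFS =====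

def pvStepA (st : Int × Int) (x : Int) : Int × Int :=
  if x > 0 ∧ st.2 ≠ x then (st.1 + 1, x) else st

def pvStepP (st : Int × Int) (x : Int) : Int × Int :=
  if st.2 ≠ x then (st.1 + 1, x) else st

-- A's inner fold skips non-positive slots, so it equals pvStepP on the filtered list
theorem pvfoldA_filter (xs : List Int) (st : Int × Int) :
    xs.foldl pvStepA st = (xs.filter (fun s => s > 0)).foldl pvStepP st := by
  induction xs generalizing st with
  | nil => rfl
  | cons x xs ih =>
    by_cases hx : x > 0
    · simp [List.filter, hx, List.foldl, ih, pvStepA, pvStepP]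
    · simp only [List.filter, List.foldl]
      rw [show decide (x > 0) = false by simp [hx]]
      have : pvStepA st x = st := by simp [pvStepA, hx]
      rw [this, ih]

theorem pvA_flat (chromosome : List (List Int)) (st : Int × Int) :
    chromosome.foldl (fun st table => table.foldl pvStepA st) st
      = (chromosome.flatMap id).foldl pvStepA st := by
  induction chromosome generalizing st with
  | nil => rfl
  | cons t ts ih => simp [List.foldl, List.flatMap_cons, List.foldl_append, ih, id]

-- the state-machine count equals the run count of the list with the leading run of cur removed
theorem pvfoldP_runs (ys : List Int) (n cur : Int) :
    (ys.foldl pvStepP (n, cur)).1 = n + pvRuns (ys.dropWhile (fun x => x == cur)) := by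
  induction ys generalizing n cur with
  | nil => simp [pvRuns]
  | cons y ys ih =>
    by_cases h : cur = y
    · subst h
      simp only [List.foldl, pvStepP, List.dropWhile]
      simpa using ih n cur
    · simp only [List.foldl, pvStepP, List.dropWhile]
      rw [if_pos h, show (y == cur) = false by simp [Ne.symm h]]
      simp only [pvRuns, ih (n + 1) y]
      ring

-- the filtered flatten is nil or starts with a positive element, so dropping a leading run of 0s is a no-op
theorem pvdrop0 (chromosome : List (List Int)) :
    (chromosome.flatMap (fun t => t.filter (fun s => s > 0))).dropWhile (fun x => x == (0 : Int))
      = chromosome.flatMap (fun t => t.filter (fun s => s > 0)) := by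
  cases hz : chromosome.flatMap (fun t => t.filter (fun s => s > 0)) with
  | nil => simp
  | cons v rest =>
    have hv : v ∈ chromosome.flatMap (fun t => t.filter (fun s => s > 0)) := by
      rw [hz]; exact List.mem_cons_self
    have hvpos : v > 0 := by
      rcases List.mem_flatMap.1 hv with ⟨t, _, hvt⟩
      have := List.of_mem_filter hvt
      exact of_decide_eq_true this
    simp [List.dropWhile, show (v == (0 : Int)) = false by simp; omega]

-- ===== VERDICT (by name: the statement is the Claim_ definition above) =====
theorem reservations_number_function_spec : Claim_equal_reservations_number_function := by
  intro chromosome _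
  show _ = _
  unfold reservations_number_function reservations_number_function_alt
  have hA : (fun (st : Int × Int) (table : List Int) =>
      table.foldl (fun st time_slot =>
        if time_slot > 0 ∧ st.2 ≠ time_slot then (st.1 + 1, time_slot) else st) st)
      = fun st table => table.foldl pvStepA st := rfl
  rw [hA, pvA_flat, pvfoldA_filter, pvfoldP_runs]
  simp only [zero_add, List.filter_flatMap, id_eq]
  rw [pvdrop0]
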